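-- pv_equiv track=rewrite | github.com/byzp/of-lyre | tools/batch_midi_transpose.py | choose_best_transposition
-- ===== SOURCE A (Python) =====
-- WHITE_PITCH_CLASSES = {0, 2, 4, 5, 7, 9, 11}  # C, D, E, F, G, A, B
--
-- C3 = 48
--
-- B5 = 83
--
-- MIN_MIDI = 0
--
-- MAX_MIDI = 127
--
-- def is_white_key(midi_note):
--     return (midi_note % 12) in WHITE_PITCH_CLASSES
--
-- def transpose_counts_for_shift(pitches, shift):
--     """计算将 pitches 全部加上 shift 后落在 C3-B5 且为白键的数量"""
--     shifted = [p + shift for p in pitches]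
--     count = 0
--     for p in shifted:
--         if p < MIN_MIDI or p > MAX_MIDI:
--             continue
--         if C3 <= p <= B5 and is_white_key(p):
--             count += 1
--     return count
--
-- def choose_best_transposition(pitches, min_shift=-24, max_shift=24):
--     """在 [min_shift, max_shift] 范围内选取一个移调，使落在 C3-B5 且为白键的数量最大。
--     tie-breaker: 选择 abs(shift) 最小的；再 tie 则选择正的 shift（向上）"""
--     best = None  # (count, abs_shift, -sign, shift) 用于比较
--     best_shift = 0
--     for shift in range(min_shift, max_shift + 1):
--         cnt = transpose_counts_for_shift(pitches, shift)
--         key = (cnt, -abs(shift), 1 if shift > 0 else (0 if shift == 0 else -1))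
--         # 我们希望最大 cnt, 然后 prefer 小的 abs(shift) -> 即更接近原调（所以 key includes -abs(shift))
--         if best is None or key > best:
--             best = key
--             best_shift = shift
--     return best_shift
-- ===== SOURCE B (Python) =====
-- # Loop inversion: instead of recounting all pitches for every shift, tally once per
-- # pitch over the 21 white targets in C3-B5 into a counter keyed by shift, then scan.
-- WHITE_PITCH_CLASSES = {0, 2, 4, 5, 7, 9, 11}
-- WHITE_TARGETS = [v for v in range(48, 84) if v % 12 in WHITE_PITCH_CLASSES]
--
-- def choose_best_transposition(pitches, min_shift=-24, max_shift=24):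
--     if min_shift > max_shift:
--         return 0
--     counts = {}
--     for p in pitches:
--         for v in WHITE_TARGETS:
--             s = v - p
--             if min_shift <= s <= max_shift:
--                 counts[s] = counts.get(s, 0) + 1
--     best = None
--     best_shift = 0
--     for shift in range(min_shift, max_shift + 1):
--         key = (counts.get(shift, 0), -abs(shift),
--                1 if shift > 0 else (0 if shift == 0 else -1))
--         if best is None or key > best:
--             best = key
--             best_shift = shift
--     return best_shift
-- ===== Notes on version B (the rewrite author's own statement) =====
-- stated objective: alternative
-- what changed: Inverts the loop nesting: instead of recounting every pitch once per candidate shift, B makes one pass over the pitches tallying, per pitch, the at most 21 white targets in C3-B5 into a shift-keyed counter, then a single scan over the shifts picks the best one with the same tie-break key (and returns 0 directly when the shift range is empty).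
import Mathlib
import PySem

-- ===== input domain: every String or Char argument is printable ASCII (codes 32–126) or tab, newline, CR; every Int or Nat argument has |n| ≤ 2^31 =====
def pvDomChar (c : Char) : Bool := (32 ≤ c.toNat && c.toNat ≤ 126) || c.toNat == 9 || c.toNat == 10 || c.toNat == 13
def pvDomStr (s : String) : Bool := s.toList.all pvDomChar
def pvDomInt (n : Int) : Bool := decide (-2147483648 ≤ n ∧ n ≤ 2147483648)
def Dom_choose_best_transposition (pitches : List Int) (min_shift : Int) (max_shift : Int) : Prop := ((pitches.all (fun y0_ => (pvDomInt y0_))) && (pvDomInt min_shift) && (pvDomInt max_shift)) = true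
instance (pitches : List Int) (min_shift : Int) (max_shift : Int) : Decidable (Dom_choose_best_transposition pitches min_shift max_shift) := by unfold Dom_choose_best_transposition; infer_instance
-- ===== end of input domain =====

-- B inverts the loop nesting (one tally pass over the pitches into a shift-keyed counter,
-- then a single scan over the shifts) instead of recounting all pitches for every shift.

-- ===== PORT A =====
def is_white_key (midi_note : Int) : Bool :=
  ([0, 2, 4, 5, 7, 9, 11] : List Int).contains (PySem.Int.mod midi_note 12)

def transpose_counts_for_shift (pitches : List Int) (shift : Int) : Int :=
  let shifted := pitches.map (fun p => p + shift)
  shifted.foldl (fun count p =>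
    if p < 0 ∨ p > 127 then count
    else if 48 ≤ p ∧ p ≤ 83 ∧ is_white_key p then count + 1 else count) 0

-- Python tuple comparison 'key > best' on the 3-tuples A builds (lexicographic)
def pyKeyGT (a b : Int × Int × Int) : Bool :=
  a.1 > b.1 || (a.1 == b.1 && (a.2.1 > b.2.1 || (a.2.1 == b.2.1 && a.2.2 > b.2.2)))

def choose_best_transposition (pitches : List Int) (min_shift : Int) (max_shift : Int) : Int :=
  ((PySem.List.pyRange min_shift (max_shift + 1) 1).foldl
    (fun (st : Option (Int × Int × Int) × Int) shift =>
      let cnt := transpose_counts_for_shift pitches shift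
      let key : Int × Int × Int :=
        (cnt, -|shift|, if shift > 0 then (1 : Int) else if shift = 0 then 0 else -1)
      match st.1 with
      | none => (some key, shift)
      | some b => if pyKeyGT key b then (some key, shift) else st)
    (none, 0)).2

-- ===== PORT B =====
def white_targets : List Int :=
  (PySem.List.pyRange 48 84 1).filter
    (fun v => ([0, 2, 4, 5, 7, 9, 11] : List Int).contains (PySem.Int.mod v 12))

def choose_best_transposition_alt (pitches : List Int) (min_shift : Int) (max_shift : Int) : Int :=
  if min_shift > max_shift then 0 else
  let counts : PySem.Dict Int Int :=
    pitches.foldl (fun d p =>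
      white_targets.foldl (fun d v =>
        let s := v - p
        if min_shift ≤ s ∧ s ≤ max_shift then d.insert s (d.getD s 0 + 1) else d) d)
      PySem.Dict.empty
  ((PySem.List.pyRange min_shift (max_shift + 1) 1).foldl
    (fun (st : Option (Int × Int × Int) × Int) shift =>
      let key : Int × Int × Int :=
        (counts.getD shift 0, -|shift|, if shift > 0 then (1 : Int) else if shift = 0 then 0 else -1)
      match st.1 with
      | none => (some key, shift)
      | some b => if pyKeyGT key b then (some key, shift) else st)
    (none, 0)).2

-- ===== PRECONDITION & SPEC =====
def Spec_choose_best_transposition (pitches : List Int) (min_shift : Int) (max_shift : Int) (out : Int) : Prop := out = choose_best_transposition_alt pitches min_shift max_shift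
instance (pitches : List Int) (min_shift : Int) (max_shift : Int) (out : Int) : Decidable (Spec_choose_best_transposition pitches min_shift max_shift out) := by unfold Spec_choose_best_transposition; infer_instance

-- ===== CLAIM (what is proved, stated in full; the proofs are below) =====
def Claim_equal_choose_best_transposition : Prop := ∀ (pitches : List Int) (min_shift : Int) (max_shift : Int), Dom_choose_best_transposition pitches min_shift max_shift → Spec_choose_best_transposition pitches min_shift max_shift (choose_best_transposition pitches min_shift max_shift)

-- ===== LEMMAS AND PROOFS =====

-- inner tally loop of B: getD after folding one pitch's white targets
theorem getD_inner (lo hi p : Int) (l : List Int) (d : PySem.Dict Int Int) (s : Int) :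
    (l.foldl (fun d v =>
        if lo ≤ v - p ∧ v - p ≤ hi then d.insert (v - p) (d.getD (v - p) 0 + 1) else d) d).getD s 0
      = d.getD s 0 + (if lo ≤ s ∧ s ≤ hi then (l.count (s + p) : Int) else 0) := by
  induction l generalizing d with
  | nil => simp
  | cons v t ih =>
    rw [List.foldl_cons, ih, List.count_cons]
    by_cases hv : v = s + p
    · subst hv
      have hk : s + p - p = s := by ring
      rw [hk]
      have hbe : ((s + p) == (s + p)) = true := by simp
      rw [hbe]
      by_cases hc : lo ≤ s ∧ s ≤ hi
      · rw [if_pos hc, if_pos hc, if_pos hc, PySem.Dict.getD_insert_self]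
        simp only [if_true]
        push_cast
        ring
      · rw [if_neg hc, if_neg hc, if_neg hc]
    · have hne : s ≠ v - p := by omega
      have hbe : (v == s + p) = false := by
        rw [beq_eq_false_iff_ne]; omega
      rw [hbe]
      simp only [Bool.false_eq_true, if_false, Nat.add_zero]
      by_cases hc : lo ≤ v - p ∧ v - p ≤ hi
      · rw [if_pos hc, PySem.Dict.getD_insert, if_neg hne]
      · rw [if_neg hc]

-- membership in the white-target list
theorem mem_white_targets (x : Int) :
    x ∈ white_targets ↔ (48 ≤ x ∧ x ≤ 83 ∧ is_white_key x = true) := by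
  simp only [white_targets, is_white_key, List.mem_filter, PySem.List.mem_pyRange_one]
  constructor
  · rintro ⟨⟨h1, h2⟩, h3⟩; exact ⟨h1, by omega, h3⟩
  · rintro ⟨h1, h2, h3⟩; exact ⟨⟨h1, by omega⟩, h3⟩

theorem nodup_white_targets : white_targets.Nodup :=
  (PySem.List.nodup_pyRange_one 48 84).filter _

theorem count_white_targets (x : Int) :
    (white_targets.count x : Int) = if x ∈ white_targets then 1 else 0 := by
  by_cases h : x ∈ white_targets
  · rw [List.count_eq_one_of_mem nodup_white_targets h]; simp [h]
  · rw [List.count_eq_zero_of_not_mem h]; simp [h]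

-- the whole counter of B, characterised pointwise
theorem getD_counter_eq (lo hi : Int) (pitches : List Int) (s : Int) :
    ((pitches.foldl (fun d p =>
        white_targets.foldl (fun d v =>
          if lo ≤ v - p ∧ v - p ≤ hi then d.insert (v - p) (d.getD (v - p) 0 + 1) else d) d)
        PySem.Dict.empty).getD s 0)
      = if lo ≤ s ∧ s ≤ hi
        then (pitches.countP (fun p => white_targets.contains (s + p)) : Int) else 0 := by
  have main : ∀ (ps : List Int) (d : PySem.Dict Int Int),
      (ps.foldl (fun d p =>
        white_targets.foldl (fun d v =>
          if lo ≤ v - p ∧ v - p ≤ hi then d.insert (v - p) (d.getD (v - p) 0 + 1) else d) d)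
        d).getD s 0
      = d.getD s 0 + (if lo ≤ s ∧ s ≤ hi
          then (ps.countP (fun p => white_targets.contains (s + p)) : Int) else 0) := by
    intro ps
    induction ps with
    | nil => intro d; simp
    | cons p t ih =>
      intro d
      simp only [List.foldl_cons, ih, getD_inner, List.countP_cons]
      by_cases hc : lo ≤ s ∧ s ≤ hi
      · simp only [hc]
        rw [count_white_targets]
        by_cases hm : (s + p) ∈ white_targets
        · simp [hm]; ring
        · simp [hm]
      · simp [hc]
  rw [main pitches PySem.Dict.empty]
  simp

-- A's per-shift count as a countP over the pitches
theorem transpose_counts_eq (pitches : List Int) (s : Int) :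
    transpose_counts_for_shift pitches s
      = (pitches.countP (fun p => white_targets.contains (s + p)) : Int) := by
  have hcong : ∀ (count : Int) (p : Int), p ∈ pitches →
      (if p + s < 0 ∨ p + s > 127 then count
       else if 48 ≤ p + s ∧ p + s ≤ 83 ∧ is_white_key (p + s) then count + 1 else count)
      = (if white_targets.contains (s + p) then count + 1 else count) := by
    intro count p _
    by_cases hm : (s + p) ∈ white_targets
    · have h := (mem_white_targets (s + p)).mp hm
      have hps : p + s = s + p := by ring
      rw [hps]
      simp only [List.contains_iff_mem, hm, if_true]
      rw [if_neg (by omega), if_pos ⟨h.1, h.2.1, h.2.2⟩]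
    · simp only [List.contains_iff_mem, hm, if_false]
      have hps : p + s = s + p := by ring
      rw [hps]
      by_cases hb : s + p < 0 ∨ s + p > 127
      · rw [if_pos hb]
      · rw [if_neg hb, if_neg]
        intro hcontra
        exact hm ((mem_white_targets (s + p)).mpr hcontra)
  simp only [transpose_counts_for_shift, List.foldl_map]
  rw [PySem.List.foldl_congr_mem (l := pitches) (init := (0 : Int))
        (f := fun (x : Int) (y : Int) =>
          if y + s < 0 ∨ y + s > 127 then x
          else if 48 ≤ y + s ∧ y + s ≤ 83 ∧ is_white_key (y + s) = true then x + 1 else x)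
        (g := fun (x : Int) (y : Int) =>
          if white_targets.contains (s + y) = true then x + 1 else x) hcong]
  rw [PySem.List.foldl_if_add_one]
  simp

-- ===== VERDICT (by name: the statement is the Claim_ definition above) =====
theorem choose_best_transposition_spec : Claim_equal_choose_best_transposition := by
  intro pitches lo hi _
  unfold Spec_choose_best_transposition
  unfold choose_best_transposition choose_best_transposition_alt
  by_cases hr : lo > hi
  · rw [if_pos hr, PySem.List.pyRange_one_eq_nil (by omega)]
    simp
  rw [if_neg hr]
  simp only []
  apply congrArg Prod.snd
  apply PySem.List.foldl_congr_mem
  intro st shift hmem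
  have hs := (PySem.List.mem_pyRange_one).mp hmem
  have hkey : ((pitches.foldl (fun d p =>
        white_targets.foldl (fun d v =>
          if lo ≤ v - p ∧ v - p ≤ hi then d.insert (v - p) (d.getD (v - p) 0 + 1) else d) d)
        PySem.Dict.empty).getD shift 0) = transpose_counts_for_shift pitches shift := by
    rw [getD_counter_eq, transpose_counts_eq, if_pos ⟨hs.1, by omega⟩]
  rw [hkey]
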